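-- pv_equiv track=rewrite | github.com/MathTauAthogen/Canalizing-Depth-Dynamics | find_attractors.py | scour
-- ===== SOURCE A (Python) =====
-- def scour(thing, array, depth):
--     """Checks if thing exists at a certain depth in array."""
--     if depth > 1:
--         is_good = False
--         for i in array:
--             if scour(thing, i, depth - 1):
--                 is_good = True
--                 break
--         return is_good
--     else:
--         try:
--             array.index(thing)
--             return True
--         except ValueError:
--             return False
-- ===== SOURCE B (Python) =====
-- def scour(thing, array, depth):
--     """Checks if thing exists at a certain depth in array.
--
--     Iterative preorder DFS over (node, depth) pairs on an explicit stack.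
--     """
--     stack = [(array, depth)]
--     while stack:
--         node, d = stack.pop()
--         if d <= 1:
--             try:
--                 node.index(thing)
--                 return True
--             except ValueError:
--                 pass
--         else:
--             for child in reversed(node):
--                 stack.append((child, d - 1))
--     return False
-- ===== Notes on version B (the rewrite author's own statement) =====
-- stated objective: alternative
-- what changed: Replaces A's recursion-with-break by an iterative preorder DFS over an explicit stack of (node, depth) pairs; Pre_ excludes only depth >= 3 with a non-empty row, where both A and B raise (the search descends below the int level and calls .index on / iterates an int).
import Mathlib
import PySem

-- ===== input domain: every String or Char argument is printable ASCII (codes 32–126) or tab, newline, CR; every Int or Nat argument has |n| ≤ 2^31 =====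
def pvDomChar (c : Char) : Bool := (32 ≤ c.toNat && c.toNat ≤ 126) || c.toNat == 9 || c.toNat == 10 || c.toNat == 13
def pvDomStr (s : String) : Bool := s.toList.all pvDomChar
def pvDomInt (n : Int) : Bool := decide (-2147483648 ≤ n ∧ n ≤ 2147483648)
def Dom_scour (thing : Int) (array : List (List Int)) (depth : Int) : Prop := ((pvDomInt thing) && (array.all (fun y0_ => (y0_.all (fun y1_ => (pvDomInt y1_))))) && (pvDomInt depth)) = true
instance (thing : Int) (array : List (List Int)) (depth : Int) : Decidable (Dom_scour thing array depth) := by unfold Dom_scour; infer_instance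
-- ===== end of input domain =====

-- B replaces A's recursion by an iterative preorder DFS on an explicit stack (alternative decomposition; equal on Pre_).

-- ===== PORT A =====
-- inner recursive call scour(thing, i, depth-1) on a row i : List Int
def scourRow (thing : Int) (i : List Int) (depth : Int) : Bool :=
  if depth > 1 then
    -- Python iterates i and recurses on each Int element, which raises (AttributeError/TypeError);
    -- Pre_scour admits this branch only for i = [], where the loop never runs and is_good stays False
    false
  else
    (PySem.List.index? i thing).isSome  -- try i.index(thing): return True; except ValueError: return False

-- 'for i in array: if scour(...): is_good = True; break'
def scourLoop (thing : Int) (depth : Int) : List (List Int) → Bool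
  | [] => false
  | i :: rest => if scourRow thing i (depth - 1) then true else scourLoop thing depth rest

def scour (thing : Int) (array : List (List Int)) (depth : Int) : Bool :=
  if depth > 1 then
    scourLoop thing depth array
  else
    false  -- array.index(thing): an Int never equals a List Int, so always ValueError → return False

-- ===== PORT B =====
-- a stack entry's node: the whole array, one row, or one element
inductive PvNode where
  | top : List (List Int) → PvNode
  | row : List Int → PvNode
  | leaf : Int → PvNode
deriving DecidableEq, Repr

-- termination measure: total node count below (and including) a node
def pvWt : PvNode → Nat
  | .top l => 1 + (l.map (fun r => 1 + r.length)).sum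
  | .row r => 1 + r.length
  | .leaf _ => 1

-- 'while stack: node, d = stack.pop(); …'; Lean list head = Python list end (the pop side);
-- 'for child in reversed(node): stack.append((child, d-1))' = prepend the children in
-- original order, so popping visits them left to right (preorder DFS)
def scourStack (thing : Int) : List (PvNode × Int) → Bool
  | [] => false
  | (n, d) :: rest =>
    if d ≤ 1 then
      match n with
      | .top _ => scourStack thing rest  -- node.index(thing): Int never equals List Int → ValueError → pass
      | .row xs => if (PySem.List.index? xs thing).isSome then true else scourStack thing rest
      | .leaf _ => false  -- int has no .index: AttributeError propagates (unreachable under Pre_scour)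
    else
      match n with
      | .top l => scourStack thing (l.map (fun r => (PvNode.row r, d - 1)) ++ rest)
      | .row xs => scourStack thing (xs.map (fun x => (PvNode.leaf x, d - 1)) ++ rest)
      | .leaf _ => false  -- iterating an int: TypeError propagates (unreachable under Pre_scour)
termination_by st => (st.map (fun p => pvWt p.1)).sum
decreasing_by
  all_goals simp [pvWt, Function.comp_def]

def scour_alt (thing : Int) (array : List (List Int)) (depth : Int) : Bool :=
  scourStack thing [(PvNode.top array, depth)]

-- ===== PRECONDITION & SPEC =====
-- Pre_ excludes exactly the inputs on which A raises (depth >= 3 with some non-empty row: the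
-- recursion descends below the int level and iterates / calls .index on an int); B raises there too.
def Pre_scour (thing : Int) (array : List (List Int)) (depth : Int) : Prop :=
  2 < depth → ∀ row ∈ array, row = []
instance (thing : Int) (array : List (List Int)) (depth : Int) : Decidable (Pre_scour thing array depth) := by unfold Pre_scour; infer_instance
def pvWitness_scour : Int × List (List Int) × Int := (3, [[1, 2], [3]], 2)

def Spec_scour (thing : Int) (array : List (List Int)) (depth : Int) (out : Bool) : Prop := out = scour_alt thing array depth
instance (thing : Int) (array : List (List Int)) (depth : Int) (out : Bool) : Decidable (Spec_scour thing array depth out) := by unfold Spec_scour; infer_instance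

-- ===== CLAIM (what is proved, stated in full; the proofs are below) =====
def Claim_equal_scour : Prop := ∀ (thing : Int) (array : List (List Int)) (depth : Int), Dom_scour thing array depth → Pre_scour thing array depth → Spec_scour thing array depth (scour thing array depth)

-- ===== LEMMAS AND PROOFS =====
-- popping a row at d ≤ 1 tests membership and moves on
lemma scourStack_row_le (thing : Int) (xs : List Int) (d : Int) (hd : d ≤ 1)
    (rest : List (PvNode × Int)) :
    scourStack thing ((PvNode.row xs, d) :: rest)
      = ((PySem.List.index? xs thing).isSome || scourStack thing rest) := by
  rw [scourStack, if_pos hd]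
  by_cases h : (PySem.List.index? xs thing).isSome
  · rw [if_pos h, h, Bool.true_or]
  · simp only [Bool.not_eq_true] at h
    rw [if_neg (by rw [h]; exact Bool.false_ne_true), h, Bool.false_or]

-- popping an empty row at d > 1 pushes nothing
lemma scourStack_row_gt (thing : Int) (d : Int) (hd : ¬ d ≤ 1)
    (rest : List (PvNode × Int)) :
    scourStack thing ((PvNode.row [], d) :: rest) = scourStack thing rest := by
  rw [scourStack, if_neg hd]
  rfl

-- a stack of rows at d ≤ 1 computes 'some row contains thing'
lemma scourStack_rows_le (thing : Int) (d : Int) (hd : d ≤ 1) (rows : List (List Int)) :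
    scourStack thing (rows.map (fun r => (PvNode.row r, d)))
      = rows.any (fun r => (PySem.List.index? r thing).isSome) := by
  induction rows with
  | nil => simp [scourStack]
  | cons r rs ih => rw [List.map_cons, scourStack_row_le thing r d hd, ih, List.any_cons]

-- a stack of empty rows at d > 1 drains to false
lemma scourStack_rows_gt (thing : Int) (d : Int) (hd : ¬ d ≤ 1) (rows : List (List Int))
    (h : ∀ r ∈ rows, r = []) :
    scourStack thing (rows.map (fun r => (PvNode.row r, d))) = false := by
  induction rows with
  | nil => simp [scourStack]
  | cons r rs ih =>
    have hr : r = [] := h r (by simp)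
    subst hr
    rw [List.map_cons, scourStack_row_gt thing d hd]
    exact ih (fun r hm => h r (by simp [hm]))

lemma scourLoop_eq_any (thing : Int) (depth : Int) (hd : depth - 1 ≤ 1) (array : List (List Int)) :
    scourLoop thing depth array = array.any (fun r => (PySem.List.index? r thing).isSome) := by
  induction array with
  | nil => rfl
  | cons i rest ih =>
    simp only [scourLoop, scourRow, if_neg (by omega : ¬ depth - 1 > 1), List.any_cons, ← ih]
    by_cases h : (PySem.List.index? i thing).isSome
    · rw [if_pos h, h, Bool.true_or]
    · simp only [Bool.not_eq_true] at h
      rw [if_neg (by rw [h]; exact Bool.false_ne_true), h, Bool.false_or]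

lemma scourLoop_big (thing : Int) (depth : Int) (h : depth - 1 > 1) (array : List (List Int)) :
    scourLoop thing depth array = false := by
  induction array with
  | nil => rfl
  | cons i rest ih => simp [scourLoop, scourRow, if_pos h, ih]

-- ===== VERDICT (by name: the statement is the Claim_ definition above) =====
theorem scour_spec : Claim_equal_scour := by
  intro thing array depth _ hpre
  unfold Spec_scour scour scour_alt
  by_cases hgt : depth > 1
  · rw [if_pos hgt, scourStack, if_neg (by omega : ¬ depth ≤ 1)]
    simp only [List.append_nil]
    by_cases hd2 : depth - 1 ≤ 1
    · rw [scourStack_rows_le thing (depth - 1) hd2, scourLoop_eq_any thing depth hd2]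
    · rw [scourStack_rows_gt thing (depth - 1) hd2 array (hpre (by omega)),
        scourLoop_big thing depth (by omega)]
  · rw [if_neg hgt, scourStack, if_pos (by omega : depth ≤ 1)]
    simp [scourStack]
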